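-- pv_equiv track=rewrite | github.com/VidaMaleki/Ada-learn | industry_prep/logevity.py | most_varied
-- ===== SOURCE A (Python) =====
-- def most_varied(recipes):
--   # Create a dictionary of chefs to a set of ingredients they use
--   # For example {"Sam": {"Tortilla", "Beef", "Cheese"}}
--   unique_ingredients = {}
--   #Iterate over the recipes, unpacking the needed values
--   for _, chef, ingredients in recipes:
--     # If this is the first time we have seen this chef
--     if chef not in unique_ingredients:
--       # Start with all the ingredients for the first recipe
--       unique_ingredients[chef] = set(ingredients)
--     else:
--       # Add each ingredient from the new recipe
--       # The set avoids creating duplicates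
--       for ingredient in ingredients:
--         unique_ingredients[chef].add(ingredient)
--
--   # Create a list of tuples. where each tuple contains
--   # the number of unique ingredients used, then the chef
--   # For example: [(2, "Hallie"), (3, "Sam")]
--   counts = []
--   for chef, ingredients in unique_ingredients.items():
--     counts.append((len(ingredients), chef))
--
--   # Sort the counts in descending order and select the top 2
--   counts.sort(reverse=True)
--   top_two = counts[:2]
--
--   # Convert the data into the final result
--   result = []
--   for _, chef in top_two:
--     sorted_ingredients = sorted(list(unique_ingredients[chef]))
--     result.append((chef, sorted_ingredients))
--
--   return result
-- ===== SOURCE B (Python) =====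
-- def most_varied(recipes):
--     # Aggregate each chef's unique ingredients.
--     by_chef = {}
--     for _, chef, ingredients in recipes:
--         by_chef.setdefault(chef, set()).update(ingredients)
--
--     # Single linear scan keeping the best two (count, chef) keys,
--     # instead of fully sorting all chefs and slicing.
--     first = None
--     second = None
--     for chef, ings in by_chef.items():
--         k = (len(ings), chef)
--         if first is None or k > first:
--             first, second = k, first
--         elif second is None or k > second:
--             second = k
--
--     result = []
--     for k in (first, second):
--         if k is not None:
--             result.append((k[1], sorted(by_chef[k[1]])))
--     return result
-- ===== Notes on version B (the rewrite author's own statement) =====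
-- stated objective: alternative
-- what changed: B replaces A's full descending sort of the (count, chef) list plus slice [:2] by a single linear scan that keeps only the best two (count, chef) keys, and aggregates the per-chef sets with setdefault/update instead of an if/else with an inner add-loop.
import Mathlib
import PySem

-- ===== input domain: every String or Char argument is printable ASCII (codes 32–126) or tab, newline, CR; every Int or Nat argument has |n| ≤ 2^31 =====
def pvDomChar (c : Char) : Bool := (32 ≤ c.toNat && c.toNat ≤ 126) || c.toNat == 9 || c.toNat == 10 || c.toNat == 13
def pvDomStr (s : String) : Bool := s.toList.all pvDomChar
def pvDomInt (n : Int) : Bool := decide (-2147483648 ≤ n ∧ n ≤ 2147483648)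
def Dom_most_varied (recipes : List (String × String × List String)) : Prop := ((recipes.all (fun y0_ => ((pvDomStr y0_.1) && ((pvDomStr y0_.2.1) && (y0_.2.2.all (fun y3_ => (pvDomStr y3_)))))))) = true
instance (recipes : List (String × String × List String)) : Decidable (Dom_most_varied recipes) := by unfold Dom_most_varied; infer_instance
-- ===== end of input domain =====

-- B replaces A's full descending sort + slice [:2] by a single linear scan keeping the best two (count, chef) keys; return values agree everywhere (alternative decomposition, no speed claim).

-- ===== PORT A =====
-- dict chef -> set of ingredients, built exactly as A's first loop does
def mvDictA (recipes : List (String × String × List String)) :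
    PySem.Dict String (PySem.Set String) :=
  recipes.foldl
    (fun d r =>
      match d.get? r.2.1 with
      | none => d.insert r.2.1 (PySem.Set.ofList r.2.2)           -- first time: set(ingredients)
      | some s => d.insert r.2.1 (r.2.2.foldl PySem.Set.add s))   -- else: add each ingredient
    PySem.Dict.empty

def most_varied (recipes : List (String × String × List String)) : List (String × List String) :=
  let ui := mvDictA recipes
  let counts : List (Int × String) :=
    ui.items.foldl (fun acc p => acc ++ [((p.2.length : Int), p.1)]) []
  let top_two := PySem.List.slice (PySem.List.sorted2 counts (·.1) (·.2) true) none (some 2)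
  -- unique_ingredients[chef]: the chef comes from the dict's own items, so the key is
  -- always present; getD [] is exact here (the default is never taken)
  top_two.foldl
    (fun res t => res ++ [(t.2, PySem.List.sorted (ui.getD t.2 []) (fun x => x) false)]) []

-- ===== PORT B =====
-- dict chef -> set, via by_chef.setdefault(chef, set()).update(ingredients)
def mvDictB (recipes : List (String × String × List String)) :
    PySem.Dict String (PySem.Set String) :=
  recipes.foldl
    (fun d r => d.insert r.2.1 (PySem.Set.update (d.getD r.2.1 []) r.2.2))
    PySem.Dict.empty

-- Python's 'k > first' on (int, str) tuples (lexicographic)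
def mvTupGt (k f : Int × String) : Bool :=
  decide (f.1 < k.1) || (decide (k.1 = f.1) && decide (f.2 < k.2))

-- one step of B's top-2 scan (mirrors B's if/elif)
def mvStep (st : Option (Int × String) × Option (Int × String)) (k : Int × String) :
    Option (Int × String) × Option (Int × String) :=
  match st with
  | (none, s) => (some k, s)                                   -- first is None
  | (some f, s) =>
    if mvTupGt k f then (some k, some f)                       -- k > first
    else
      match s with
      | none => (some f, some k)                               -- second is None
      | some sk => if mvTupGt k sk then (some f, some k) else (some f, some sk)

def most_varied_alt (recipes : List (String × String × List String)) : List (String × List String) :=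
  let by_chef := mvDictB recipes
  let fs :=
    by_chef.items.foldl (fun st p => mvStep st ((p.2.length : Int), p.1)) (none, none)
  [fs.1, fs.2].foldl
    (fun res o =>
      match o with
      | none => res
      | some k => res ++ [(k.2, PySem.List.sorted (by_chef.getD k.2 []) (fun x => x) false)]) []

-- ===== PRECONDITION & SPEC =====
def Spec_most_varied (recipes : List (String × String × List String)) (out : List (String × List String)) : Prop := out = most_varied_alt recipes
instance (recipes : List (String × String × List String)) (out : List (String × List String)) : Decidable (Spec_most_varied recipes out) := by unfold Spec_most_varied; infer_instance

-- ===== CLAIM (what is proved, stated in full; the proofs are below) =====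
def Claim_equal_most_varied : Prop := ∀ (recipes : List (String × String × List String)), Dom_most_varied recipes → Spec_most_varied recipes (most_varied recipes)

-- ===== LEMMAS AND PROOFS =====

-- the two dict-building steps agree pointwise, hence the dicts are equal
lemma mvDict_eq (recipes : List (String × String × List String)) :
    mvDictA recipes = mvDictB recipes := by
  unfold mvDictA mvDictB
  congr 1
  funext d r
  cases h : d.get? r.2.1 <;>
    simp [PySem.Dict.getD, h, PySem.Set.update, PySem.Set.ofList, PySem.Set.empty]

-- Python's tuple-greater test, written as the before-relation of sorted2's reverse sort
lemma mvTupGt_eq (x y : Int × String) :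
    mvTupGt x y = (decide (y.1 < x.1) || (!decide (x.1 < y.1) && decide (y.2 < x.2))) := by
  rcases lt_trichotomy x.1 y.1 with h | h | h
  · simp [mvTupGt, h, not_lt_of_gt, ne_of_lt]
  · simp [mvTupGt, h]
  · simp [mvTupGt, h, not_lt_of_gt, ne_of_gt]

-- A's reverse tuple sort is the insertBy fold with mvTupGt as before-relation
lemma mvSorted2_eq (L : List (Int × String)) :
    PySem.List.sorted2 L (·.1) (·.2) true =
      L.foldl (fun acc x => PySem.List.insertBy (fun a b => mvTupGt a b) x acc) [] := by
  show L.foldl (fun acc x => PySem.List.insertBy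
      (fun a b => decide (b.1 < a.1) || (!decide (a.1 < b.1) && decide (b.2 < a.2))) x acc) [] = _
  congr 1
  funext acc x
  congr 1
  funext a b
  rw [mvTupGt_eq]

-- the first two elements of a list, as B's scan state
def mvPairOf (l : List (Int × String)) : Option (Int × String) × Option (Int × String) :=
  match l with
  | [] => (none, none)
  | [a] => (some a, none)
  | a :: b :: _ => (some a, some b)

-- inserting one element moves the first-two-of-sorted state exactly as one scan step does
lemma mvScan_insert (x : Int × String) (S : List (Int × String)) :
    mvPairOf ((PySem.List.insertBy (fun a b => mvTupGt a b) x S).take 2) =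
      mvStep (mvPairOf (S.take 2)) x := by
  match S with
  | [] => rfl
  | [a] =>
    simp only [PySem.List.insertBy, mvPairOf, mvStep]
    split_ifs with h1 <;> simp [h1]
  | a :: b :: t =>
    by_cases h1 : mvTupGt x a <;> by_cases h2 : mvTupGt x b <;>
      simp [PySem.List.insertBy, mvPairOf, mvStep, h1, h2]

-- B's scan computes the first two elements of A's descending sort
lemma mvScan_eq (L : List (Int × String)) :
    L.foldl mvStep (none, none) =
      mvPairOf ((PySem.List.sorted2 L (·.1) (·.2) true).take 2) := by
  rw [mvSorted2_eq]
  induction L using List.reverseRecOn with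
  | nil => rfl
  | append_singleton L x ih =>
    rw [List.foldl_append, List.foldl_append, ih]
    simp only [List.foldl_cons, List.foldl_nil]
    rw [mvScan_insert]

-- ===== VERDICT (by name: the statement is the Claim_ definition above) =====
theorem most_varied_spec : Claim_equal_most_varied := by
  intro recipes _
  unfold Spec_most_varied
  simp only [most_varied, most_varied_alt]
  rw [← mvDict_eq]
  rw [PySem.List.foldl_append_singleton_eq_map
        (f := fun p : String × PySem.Set String => ((p.2.length : Int), p.1))]
  rw [← List.foldl_map (f := fun p : String × PySem.Set String => ((p.2.length : Int), p.1))
        (g := mvStep)]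
  rw [List.nil_append, mvScan_eq]
  have hslice : ∀ S : List (Int × String),
      PySem.List.slice S none (some 2) = S.take 2 := by
    intro S
    simpa using PySem.List.slice_to_natCast S 2
  rw [hslice]
  rcases h : PySem.List.sorted2
      ((mvDictA recipes).items.map (fun p => ((p.2.length : Int), p.1))) (·.1) (·.2) true with
    _ | ⟨a, t⟩
  · simp [h, mvPairOf]
  · rcases t with _ | ⟨b, t'⟩ <;> simp [h, mvPairOf]
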